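-- pv_equiv track=rewrite | github.com/GillySraia/Boggle-game | Boggle game/ex11_utils.py | are_duplicates_in_path
-- ===== SOURCE A (Python) =====
-- def are_duplicates_in_path(path):
--     # Check if the path contains any duplicate coordinates
--     copied_path = path[:]
--     for coord in path:
--         cur = copied_path.pop(0)
--         if cur in copied_path:
--             return False
--         else:
--             copied_path.append(cur)
--     return True
-- ===== SOURCE B (Python) =====
-- def are_duplicates_in_path(path):
--     # Sort a copy; any duplicates become adjacent, so one adjacent-pair scan suffices.
--     s = sorted(path)
--     for a, b in zip(s, s[1:]):
--         if a == b:
--             return False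
--     return True
-- ===== Notes on version B (the rewrite author's own statement) =====
-- stated objective: alternative
-- what changed: replaces A's rotating-copy loop with repeated membership scans by sort-then-adjacent-pair scan
import Mathlib
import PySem

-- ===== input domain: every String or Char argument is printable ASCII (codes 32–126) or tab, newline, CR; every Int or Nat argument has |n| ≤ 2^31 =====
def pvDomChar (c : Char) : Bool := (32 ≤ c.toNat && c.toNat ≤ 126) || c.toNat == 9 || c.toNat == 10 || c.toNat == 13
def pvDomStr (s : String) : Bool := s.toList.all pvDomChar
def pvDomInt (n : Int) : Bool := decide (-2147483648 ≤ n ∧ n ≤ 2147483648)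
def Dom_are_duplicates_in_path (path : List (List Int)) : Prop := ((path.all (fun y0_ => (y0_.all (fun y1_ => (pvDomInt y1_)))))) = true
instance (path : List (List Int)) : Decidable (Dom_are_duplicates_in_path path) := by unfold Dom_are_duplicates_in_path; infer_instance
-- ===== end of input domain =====

-- ===== PORT A =====
-- B differs from A only in algorithm (sort + adjacent scan vs rotating membership scans); same return value.
-- literal transliteration of A: copied_path rotates (pop(0) / append), membership scan each step
def pvLoopA : List (List Int) → List (List Int) → Bool
  | [], _ => true
  | _ :: rest, copied =>
      match copied with
      | [] => true  -- pop(0) on empty: unreachable when started with copied = path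
      | c :: cs => if c ∈ cs then false else pvLoopA rest (cs ++ [c])

def are_duplicates_in_path (path : List (List Int)) : Bool :=
  pvLoopA path path

-- ===== PORT B =====
-- transliteration of Source B: scan adjacent pairs of sorted(path)
def pvAdjScan : List (List Int) → Bool
  | a :: b :: rest => if a = b then false else pvAdjScan (b :: rest)
  | _ => true

def are_duplicates_in_path_alt (path : List (List Int)) : Bool :=
  pvAdjScan (@PySem.List.sorted (List Int) (List Int) List.instLinearOrder.toLT
    LinearOrder.toDecidableLT path (fun x => x) false)

-- ===== PRECONDITION & SPEC =====
def Spec_are_duplicates_in_path (path : List (List Int)) (out : Bool) : Prop := out = are_duplicates_in_path_alt path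
instance (path : List (List Int)) (out : Bool) : Decidable (Spec_are_duplicates_in_path path out) := by unfold Spec_are_duplicates_in_path; infer_instance

-- ===== CLAIM (what is proved, stated in full; the proofs are below) =====
def Claim_equal_are_duplicates_in_path : Prop := ∀ (path : List (List Int)), Dom_are_duplicates_in_path path → Spec_are_duplicates_in_path path (are_duplicates_in_path path)

-- ===== LEMMAS AND PROOFS =====

-- A's loop with state (remaining ++ seen) decides Nodup of the whole list
theorem pvLoopA_eq (l : List (List Int)) : ∀ (acc : List (List Int)), acc.Nodup →
    pvLoopA l (l ++ acc) = decide ((l ++ acc).Nodup) := by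
  induction l with
  | nil => intro acc h; simp [pvLoopA, h]
  | cons x xs ih =>
      intro acc h
      by_cases hx : x ∈ xs ++ acc
      · simp [pvLoopA, hx]
      · have hx2 : x ∉ acc := by
          simp only [List.mem_append, not_or] at hx; exact hx.2
        have hacc : (acc ++ [x]).Nodup :=
          h.append (List.nodup_singleton x) (List.disjoint_singleton.mpr hx2)
        have step := ih (acc ++ [x]) hacc
        rw [List.cons_append]
        show (if x ∈ xs ++ acc then false else pvLoopA xs (xs ++ acc ++ [x]))
            = decide (x :: (xs ++ acc)).Nodup
        rw [if_neg hx, List.append_assoc, step]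
        have hp : (xs ++ (acc ++ [x])).Perm (x :: (xs ++ acc)) := by
          rw [← List.append_assoc, ← List.singleton_append]
          exact List.perm_append_comm
        exact decide_eq_decide.mpr hp.nodup_iff

theorem pvAdjScan_eq_true (s : List (List Int)) :
    pvAdjScan s = true ↔ List.IsChain (fun a b => a ≠ b) s := by
  match s with
  | [] => simp [pvAdjScan]
  | [a] => simp [pvAdjScan]
  | a :: b :: rest =>
      by_cases hab : a = b
      · simp [pvAdjScan, hab]
      · rw [pvAdjScan, if_neg hab, pvAdjScan_eq_true (b :: rest), List.isChain_cons_cons]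
        simp [hab]

theorem chain_lt_of_chain_ne (s : List (List Int))
    (hc : List.IsChain (fun a b => a ≠ b) s)
    (hle : List.IsChain (fun a b => a ≤ b) s) :
    List.IsChain (fun a b => a < b) s := by
  match s with
  | [] => exact .nil
  | [a] => exact .singleton _
  | a :: b :: rest =>
      rw [List.isChain_cons_cons] at hc hle ⊢
      exact ⟨lt_of_le_of_ne hle.1 hc.1, chain_lt_of_chain_ne (b :: rest) hc.2 hle.2⟩

theorem chain_ne_iff_nodup (s : List (List Int)) (hs : s.Pairwise (fun a b => a ≤ b)) :
    List.IsChain (fun a b => a ≠ b) s ↔ s.Nodup := by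
  constructor
  · intro hc
    have hlt : List.IsChain (fun a b => a < b) s :=
      chain_lt_of_chain_ne s hc hs.isChain
    exact (List.isChain_iff_pairwise.mp hlt).imp (fun h => ne_of_lt h)
  · intro hn; exact hn.isChain

theorem alt_eq_nodup (path : List (List Int)) :
    are_duplicates_in_path_alt path = decide path.Nodup := by
  have hperm : (@PySem.List.sorted (List Int) (List Int) List.instLinearOrder.toLT
      LinearOrder.toDecidableLT path (fun x => x) false).Perm path :=
    @PySem.List.sorted_perm (List Int) (List Int) List.instLinearOrder.toLT
      LinearOrder.toDecidableLT path (fun x => x) false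
  have hpw : (@PySem.List.sorted (List Int) (List Int) List.instLinearOrder.toLT
      LinearOrder.toDecidableLT path (fun x => x) false).Pairwise (fun a b => a ≤ b) :=
    PySem.List.sorted_pairwise path (fun x => x)
  have h1 : are_duplicates_in_path_alt path = true ↔ path.Nodup := by
    unfold are_duplicates_in_path_alt
    rw [pvAdjScan_eq_true, chain_ne_iff_nodup _ hpw]
    exact hperm.nodup_iff
  exact Bool.eq_iff_iff.mpr (by simp [h1])

-- ===== VERDICT (by name: the statement is the Claim_ definition above) =====
theorem are_duplicates_in_path_spec : Claim_equal_are_duplicates_in_path := by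
  intro path _
  unfold Spec_are_duplicates_in_path are_duplicates_in_path
  have := pvLoopA_eq path [] List.nodup_nil
  simp only [List.append_nil] at this
  rw [this, alt_eq_nodup]
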